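-- pv_equiv track=rewrite | github.com/rsqai/D | algorithm_exercise/lc.py | kaopudeche
-- ===== SOURCE A (Python) =====
-- def kaopudeche(n):
--     """
--     任何数字位置遇到数字4就直接跳过,输入变换后的数字，输出本来的值
--     :param n:
--     :return:
--     """
--     # todo: 相当于司机的计数中没有数字4，也就是9进制，故本题其实是9进制转10进制
--     n_str = str(n)
--     s = 0
--     for i in range(1, len(n_str) + 1):
--         n_int = int(n_str[-i])
--         if n_int > 4:
--             n_int -= 1
--         s = s + n_int * (9 ** (i - 1))
--     return s
-- ===== SOURCE B (Python) =====
-- def kaopudeche(n):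
--     s = 0
--     for ch in str(n):
--         d = int(ch)
--         if d > 4:
--             d -= 1
--         s = s * 9 + d
--     return s
-- ===== Notes on version B (the rewrite author's own statement) =====
-- stated objective: simpler
-- what changed: Replaces the reverse-indexed sum of digit*9**(i-1) power terms with a single left-to-right Horner accumulator s = s*9 + d over str(n), removing the explicit powers and negative indexing.
import Mathlib
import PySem

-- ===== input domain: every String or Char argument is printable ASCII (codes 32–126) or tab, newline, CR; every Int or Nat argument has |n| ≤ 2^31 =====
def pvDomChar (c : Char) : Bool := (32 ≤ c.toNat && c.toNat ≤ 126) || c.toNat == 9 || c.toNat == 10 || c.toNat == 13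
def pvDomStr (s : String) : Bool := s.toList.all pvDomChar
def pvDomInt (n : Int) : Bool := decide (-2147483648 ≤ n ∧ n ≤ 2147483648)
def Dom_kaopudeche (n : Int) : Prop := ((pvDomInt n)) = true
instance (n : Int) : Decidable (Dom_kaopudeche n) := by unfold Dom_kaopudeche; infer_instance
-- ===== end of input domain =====

-- B replaces A's reverse-indexed sum of digit*9^(i-1) power terms with a single
-- left-to-right Horner accumulator s = s*9 + d (simpler decomposition, same cost class).

-- ===== PORT A =====
def kaopudeche (n : Int) : Int :=
  let nStr := PySem.Int.toChars n
  (PySem.List.pyRange 1 ((nStr.length : Int) + 1) 1).foldl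
    (fun s i =>
      let nInt := ((PySem.List.pyGet? nStr (-i)).bind fun c => PySem.Int.ofChars? [c]).getD 0
      let nInt2 := if nInt > 4 then nInt - 1 else nInt
      s + nInt2 * 9 ^ (i - 1).toNat) 0

-- ===== PORT B =====
def kaopudeche_alt (n : Int) : Int :=
  (PySem.Int.toChars n).foldl
    (fun s c =>
      let d := (PySem.Int.ofChars? [c]).getD 0
      let d2 := if d > 4 then d - 1 else d
      s * 9 + d2) 0

-- ===== PRECONDITION & SPEC =====
-- Pre_ excludes negative n: there str(n) starts with '-' and int('-') raises ValueError in
-- both A and B.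
def Pre_kaopudeche (n : Int) : Prop := 0 ≤ n
instance (n : Int) : Decidable (Pre_kaopudeche n) := by unfold Pre_kaopudeche; infer_instance
def pvWitness_kaopudeche : Int := (15)

def Spec_kaopudeche (n : Int) (out : Int) : Prop := out = kaopudeche_alt n
instance (n : Int) (out : Int) : Decidable (Spec_kaopudeche n out) := by unfold Spec_kaopudeche; infer_instance

-- ===== CLAIM (what is proved, stated in full; the proofs are below) =====
def Claim_equal_kaopudeche : Prop := ∀ (n : Int), Dom_kaopudeche n → Pre_kaopudeche n → Spec_kaopudeche n (kaopudeche n)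

-- ===== LEMMAS AND PROOFS =====

-- the per-character value both programs compute (digit, minus one above 4)
def pvF (c : Char) : Int :=
  let d := (PySem.Int.ofChars? [c]).getD 0
  if d > 4 then d - 1 else d

-- the positional value both folds amount to
def pvV : List Char → Int
  | [] => 0
  | c :: t => pvF c * 9 ^ t.length + pvV t

lemma sum_terms_eq_pvV (l : List Char) :
    ((PySem.List.pyRange 1 ((l.length : Int) + 1) 1).map
      (fun i =>
        (let nInt := ((PySem.List.pyGet? l (-i)).bind fun c => PySem.Int.ofChars? [c]).getD 0
         let nInt2 := if nInt > 4 then nInt - 1 else nInt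
         nInt2 * 9 ^ (i - 1).toNat))).sum = pvV l := by
  induction l with
  | nil => simp [PySem.List.pyRange_one_eq_nil, pvV]
  | cons c t ih =>
    have hlen : ((c :: t).length : Int) + 1 = ((t.length : Int) + 1) + 1 := by
      push_cast [List.length_cons]; ring
    rw [hlen, PySem.List.pyRange_one_succ_right (by omega), List.map_append,
        List.sum_append]
    have hlast :
        PySem.List.pyGet? (c :: t) (-((t.length : Int) + 1)) = some c := by
      have : -((t.length : Int) + 1) = -(((t.length + 1 : Nat) : Int)) := by push_cast; ring
      rw [this, PySem.List.pyGet?_neg_natCast (c :: t) (t.length + 1) (by omega) (by simp)]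
      simp
    have hmap :
        (PySem.List.pyRange 1 ((t.length : Int) + 1) 1).map
          (fun i =>
            (let nInt := ((PySem.List.pyGet? (c :: t) (-i)).bind fun c => PySem.Int.ofChars? [c]).getD 0
             let nInt2 := if nInt > 4 then nInt - 1 else nInt
             nInt2 * 9 ^ (i - 1).toNat))
        = (PySem.List.pyRange 1 ((t.length : Int) + 1) 1).map
          (fun i =>
            (let nInt := ((PySem.List.pyGet? t (-i)).bind fun c => PySem.Int.ofChars? [c]).getD 0
             let nInt2 := if nInt > 4 then nInt - 1 else nInt
             nInt2 * 9 ^ (i - 1).toNat)) := by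
      refine List.map_congr_left (fun i hi => ?_)
      rw [PySem.List.mem_pyRange_one] at hi
      have hk : i = ((i.toNat : Nat) : Int) := by omega
      have h1 : 0 < i.toNat := by omega
      have h2 : i.toNat ≤ t.length := by omega
      have hget : PySem.List.pyGet? (c :: t) (-i) = PySem.List.pyGet? t (-i) := by
        rw [hk, PySem.List.pyGet?_neg_natCast (c :: t) i.toNat h1 (by simp; omega),
            PySem.List.pyGet?_neg_natCast t i.toNat h1 (by omega)]
        have : (c :: t).length - i.toNat = (t.length - i.toNat) + 1 := by
          simp; omega
        rw [this]
        simp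
      simp only [hget]
    rw [hmap, ih]
    have hpow : ((t.length : Int) + 1 - 1).toNat = t.length := by omega
    simp only [List.map_cons, List.map_nil, List.sum_cons, List.sum_nil, hlast, pvV, hpow]
    simp [pvF]
    ring

lemma horner_eq (l : List Char) (s0 : Int) :
    l.foldl (fun s c => s * 9 + pvF c) s0 = s0 * 9 ^ l.length + pvV l := by
  induction l generalizing s0 with
  | nil => simp [pvV]
  | cons c t ih =>
    simp only [List.foldl_cons, ih, pvV, List.length_cons, pow_succ]
    ring

-- ===== VERDICT (by name: the statement is the Claim_ definition above) =====
theorem kaopudeche_spec : Claim_equal_kaopudeche := by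
  intro n _ _
  unfold Spec_kaopudeche
  show kaopudeche n = kaopudeche_alt n
  have hA : kaopudeche n =
      ((PySem.List.pyRange 1 (((PySem.Int.toChars n).length : Int) + 1) 1).map
        (fun i =>
          (let nInt := ((PySem.List.pyGet? (PySem.Int.toChars n) (-i)).bind
              fun c => PySem.Int.ofChars? [c]).getD 0
           let nInt2 := if nInt > 4 then nInt - 1 else nInt
           nInt2 * 9 ^ (i - 1).toNat))).sum := by
    show (PySem.List.pyRange 1 (((PySem.Int.toChars n).length : Int) + 1) 1).foldl
        (fun s i =>
          s + (let nInt := ((PySem.List.pyGet? (PySem.Int.toChars n) (-i)).bind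
              fun c => PySem.Int.ofChars? [c]).getD 0
           let nInt2 := if nInt > 4 then nInt - 1 else nInt
           nInt2 * 9 ^ (i - 1).toNat)) 0 = _
    rw [PySem.List.foldl_add]
    simp
  have hB : kaopudeche_alt n =
      (PySem.Int.toChars n).foldl (fun s c => s * 9 + pvF c) 0 := rfl
  rw [hA, hB, sum_terms_eq_pvV, horner_eq]
  simp
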